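-- pv_equiv track=rewrite | github.com/domi131domi/RadioCheck | audio_editor.py | get_index_range
-- ===== SOURCE A (Python) =====
-- def get_index_range(f, min_f, max_f):
--     start = 0
--     end = 0
--     for idx, x in enumerate(f):
--         if x <= min_f:
--             start = idx + 1
--             continue
--         if x >= max_f:
--             end = idx - 1
--             break
--     return start, end
-- ===== SOURCE B (Python) =====
-- def get_index_range(f, min_f, max_f):
--     # Two-phase rewrite: locate the break index first, then find the last
--     # element <= min_f before it by scanning the prefix from the right.
--     j = next((i for i, x in enumerate(f) if x > min_f and x >= max_f), len(f))
--     rev = f[:j][::-1]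
--     k = 0
--     while k < len(rev) and rev[k] > min_f:
--         k += 1
--     start = j - k
--     end = j - 1 if j < len(f) else 0
--     return start, end
-- ===== Notes on version B (the rewrite author's own statement) =====
-- stated objective: alternative
-- what changed: A's single stateful forward loop (running start/end with continue/break) is replaced by two independent phases: first find the break index j (first element > min_f and >= max_f), then scan the prefix f[:j] from the right for the last element <= min_f; start and end are computed from j and that right-scan count.
import Mathlib
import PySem

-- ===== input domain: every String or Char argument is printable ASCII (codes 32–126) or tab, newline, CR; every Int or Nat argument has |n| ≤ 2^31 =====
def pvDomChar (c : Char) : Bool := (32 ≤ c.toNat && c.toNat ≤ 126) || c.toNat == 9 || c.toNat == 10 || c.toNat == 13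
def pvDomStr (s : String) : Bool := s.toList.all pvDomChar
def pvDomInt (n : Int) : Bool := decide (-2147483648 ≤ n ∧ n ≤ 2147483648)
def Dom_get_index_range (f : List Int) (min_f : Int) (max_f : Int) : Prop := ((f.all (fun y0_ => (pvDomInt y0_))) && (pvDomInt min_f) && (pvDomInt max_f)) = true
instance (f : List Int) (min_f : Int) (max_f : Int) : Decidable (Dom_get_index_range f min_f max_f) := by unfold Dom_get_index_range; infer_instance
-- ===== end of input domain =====

-- B rewrites A's single stateful forward loop as two independent phases
-- (find the break index, then scan the prefix from the right); objective: alternative.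

-- ===== PORT A =====
-- A's loop: idx is the enumerate counter (a Nat, cast to Int where Python's
-- arithmetic can go negative: end = idx - 1); s, e are the running start/end
def pvGoA (min_f max_f : Int) : List Int → Nat → Int → Int → Int × Int
  | [], _, s, e => (s, e)
  | x :: r, idx, s, e =>
      if x ≤ min_f then pvGoA min_f max_f r (idx + 1) ((idx : Int) + 1) e
      else if x ≥ max_f then (s, (idx : Int) - 1)
      else pvGoA min_f max_f r (idx + 1) s e

def get_index_range (f : List Int) (min_f : Int) (max_f : Int) : Int × Int :=
  pvGoA min_f max_f f 0 0 0

-- ===== PORT B =====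
-- next((i for i, x in enumerate(f) if x > min_f and x >= max_f), <default>)
def pvFB (min_f max_f : Int) : List Int → Nat → Option Nat
  | [], _ => none
  | x :: r, i => if min_f < x ∧ max_f ≤ x then some i else pvFB min_f max_f r (i + 1)

-- the 'while k < len(rev) and rev[k] > min_f: k += 1' counter
def pvCW (min_f : Int) : List Int → Nat
  | [] => 0
  | x :: r => if min_f < x then pvCW min_f r + 1 else 0

def get_index_range_alt (f : List Int) (min_f : Int) (max_f : Int) : Int × Int :=
  let jo := pvFB min_f max_f f 0
  let j := jo.getD f.length
  -- f[:j][::-1] with 0 ≤ j ≤ len(f) is exactly (f.take j).reverse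
  let rev := (f.take j).reverse
  let k := pvCW min_f rev
  let start : Int := (j : Int) - (k : Int)
  let e : Int := if j < f.length then (j : Int) - 1 else 0
  (start, e)

-- ===== PRECONDITION & SPEC =====
def Spec_get_index_range (f : List Int) (min_f : Int) (max_f : Int) (out : Int × Int) : Prop := out = get_index_range_alt f min_f max_f
instance (f : List Int) (min_f : Int) (max_f : Int) (out : Int × Int) : Decidable (Spec_get_index_range f min_f max_f out) := by unfold Spec_get_index_range; infer_instance

-- ===== CLAIM (what is proved, stated in full; the proofs are below) =====
def Claim_equal_get_index_range : Prop := ∀ (f : List Int) (min_f : Int) (max_f : Int), Dom_get_index_range f min_f max_f → Spec_get_index_range f min_f max_f (get_index_range f min_f max_f)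

-- ===== LEMMAS AND PROOFS =====

-- B's two-phase computation generalized to a start offset n and initial start/end s, e
def pvRHS (min_f max_f : Int) (f : List Int) (n : Nat) (s e : Int) : Int × Int :=
  ((if pvCW min_f ((f.take ((pvFB min_f max_f f n).getD (n + f.length) - n)).reverse)
        = (f.take ((pvFB min_f max_f f n).getD (n + f.length) - n)).length then s
    else ((pvFB min_f max_f f n).getD (n + f.length) : Int)
         - (pvCW min_f ((f.take ((pvFB min_f max_f f n).getD (n + f.length) - n)).reverse) : Int)),
   match pvFB min_f max_f f n with | some j' => (j' : Int) - 1 | none => e)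

lemma pvCW_le (min_f : Int) (l : List Int) : pvCW min_f l ≤ l.length := by
  induction l with
  | nil => simp [pvCW]
  | cons x r ih => simp only [pvCW, List.length_cons]; split <;> omega

lemma pvCW_append_one (min_f x : Int) (l : List Int) :
    pvCW min_f (l ++ [x]) =
      if pvCW min_f l = l.length then (if min_f < x then l.length + 1 else l.length)
      else pvCW min_f l := by
  induction l with
  | nil => simp [pvCW]
  | cons y r ih =>
      have hle := pvCW_le min_f r
      simp only [pvCW, List.cons_append, List.length_cons]
      split
      · rw [ih]; split_ifs <;> omega
      · simp

lemma pvFB_bounds (min_f max_f : Int) (l : List Int) (n j : Nat)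
    (h : pvFB min_f max_f l n = some j) : n ≤ j ∧ j < n + l.length := by
  induction l generalizing n with
  | nil => simp [pvFB] at h
  | cons x r ih =>
      simp only [pvFB] at h
      split at h
      · cases h; simp
      · have := ih (n + 1) h
        simp only [List.length_cons]; omega

-- stepping the offset past a non-breaking element
lemma pvRHS_cons (min_f max_f x : Int) (r : List Int) (n : Nat) (s e : Int)
    (h : ¬ (min_f < x ∧ max_f ≤ x)) :
    pvRHS min_f max_f (x :: r) n s e
      = pvRHS min_f max_f r (n + 1) (if x ≤ min_f then (n : Int) + 1 else s) e := by
  unfold pvRHS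
  rw [show pvFB min_f max_f (x :: r) n = pvFB min_f max_f r (n + 1) from by
        simp [pvFB, h]]
  rcases hjo : pvFB min_f max_f r (n + 1) with _ | j
  · simp only [Option.getD]
    have e1 : n + (x :: r).length - n = r.length + 1 := by simp
    have e2 : n + 1 + r.length - (n + 1) = r.length := by omega
    rw [e1, e2, List.take_length,
        show (x :: r).take (r.length + 1) = x :: r from by
          simp]
    simp only [Prod.mk.injEq]
    refine ⟨?_, trivial⟩
    rw [show (x :: r).reverse = r.reverse ++ [x] from by simp, pvCW_append_one]
    have hle := pvCW_le min_f r.reverse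
    rw [List.length_reverse] at hle ⊢
    have hl : (x :: r).length = r.length + 1 := by simp
    rw [hl]
    split_ifs <;> first | rfl | omega
  · obtain ⟨hj1, hj2⟩ := pvFB_bounds min_f max_f r (n + 1) j hjo
    simp only [Option.getD]
    have e1 : j - n = (j - (n + 1)) + 1 := by omega
    rw [e1, List.take_succ_cons]
    simp only [Prod.mk.injEq]
    refine ⟨?_, trivial⟩
    have hlenpre : (r.take (j - (n + 1))).length = j - (n + 1) := by
      simp; omega
    rw [show (x :: r.take (j - (n + 1))).reverse = (r.take (j - (n + 1))).reverse ++ [x] from by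
          simp, pvCW_append_one]
    have hle := pvCW_le min_f (r.take (j - (n + 1))).reverse
    rw [List.length_reverse] at hle ⊢
    rw [hlenpre] at hle ⊢
    simp only [List.length_cons, hlenpre]
    split_ifs <;> first | rfl | omega

-- main invariant: A's loop from offset n with running start s and end e is
-- B's two-phase computation on the remaining list
lemma goA_eq (min_f max_f : Int) (f : List Int) : ∀ (n : Nat) (s e : Int),
    pvGoA min_f max_f f n s e = pvRHS min_f max_f f n s e := by
  induction f with
  | nil => intro n s e; simp [pvGoA, pvRHS, pvFB, pvCW]
  | cons x r ih =>
      intro n s e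
      by_cases hb : min_f < x ∧ max_f ≤ x
      · -- break at x: A returns (s, n - 1) at once
        have h1 : ¬ x ≤ min_f := by omega
        have h2 : x ≥ max_f := by omega
        simp [pvGoA, h1, h2, pvRHS, pvFB, hb, pvCW]
      · rw [pvRHS_cons min_f max_f x r n s e hb, ← ih]
        by_cases h1 : x ≤ min_f
        · simp [pvGoA, h1]
        · have h2 : ¬ x ≥ max_f := by omega
          simp [pvGoA, h1, h2]

-- ===== VERDICT (by name: the statement is the Claim_ definition above) =====
theorem get_index_range_spec : Claim_equal_get_index_range := by
  intro f min_f max_f _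
  unfold Spec_get_index_range get_index_range get_index_range_alt
  rw [goA_eq]
  unfold pvRHS
  rcases hjo : pvFB min_f max_f f 0 with _ | j
  · simp only [Option.getD, Nat.zero_add, Nat.sub_zero, List.take_length]
    have hle := pvCW_le min_f f.reverse
    rw [List.length_reverse] at hle
    simp only [Prod.mk.injEq]
    constructor
    · split_ifs with h
      · omega
      · rfl
    · simp
  · obtain ⟨_, hj2⟩ := pvFB_bounds min_f max_f f 0 j hjo
    simp only [Option.getD, Nat.sub_zero]
    have hlenpre : (f.take j).length = j := by simp; omega
    have hle := pvCW_le min_f (f.take j).reverse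
    rw [List.length_reverse, hlenpre] at hle
    simp only [Prod.mk.injEq, hlenpre]
    constructor
    · split_ifs with h
      · omega
      · rfl
    · rw [if_pos (by omega : j < f.length)]
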